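-- pv_equiv track=rewrite | github.com/johnsbrew/svg2tikz | lib/font.py | getFontSizeCmd
-- ===== SOURCE A (Python) =====
-- AVAILABLE_PT = [6, 8, 9, 10, 11, 12, 15, 16, 21, 25]
--
-- PT_TO_CMD = [
--   "\\tiny", # 6
--   "\\scriptsize", # 8
--   "\\footnotesize", # 9
--   "\\small", # 10
--   "\\normalsize", # 11
--   "\\large", # 12
--   "\\Large", # 15
--   "\\LARGE", # 17
--   "\\huge", # 21
--   "\\Huge" # 25
-- ]
--
-- def getFontSizeCmd(pt):
--   # the idea here is NOT to get a perfect ratio but use the default command for usable result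
--   if pt in AVAILABLE_PT:
--     cmd = PT_TO_CMD[AVAILABLE_PT.index(pt)]
--   elif pt > AVAILABLE_PT[-1]:
--     return "\\fontsize{{{}}}{{{}}}\\selectfont".format(pt,pt)
--   else:
--     cmd = PT_TO_CMD[0]
--     index = 0
--     for defaultpt in AVAILABLE_PT:
--       if pt >= defaultpt:
--         cmd = PT_TO_CMD[index]
--         index += 1
--       else:
--         break
--   if cmd == "\\normalsize":
--     return ""
--   else:
--     return cmd
-- ===== SOURCE B (Python) =====
-- AVAILABLE_PT = [6, 8, 9, 10, 11, 12, 15, 16, 21, 25]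
--
-- PT_TO_CMD = [
--   "\\tiny",
--   "\\scriptsize",
--   "\\footnotesize",
--   "\\small",
--   "\\normalsize",
--   "\\large",
--   "\\Large",
--   "\\LARGE",
--   "\\huge",
--   "\\Huge"
-- ]
--
-- def getFontSizeCmd(pt):
--   if pt > AVAILABLE_PT[-1]:
--     return "\\fontsize{{{}}}{{{}}}\\selectfont".format(pt, pt)
--   idx = max(sum(d <= pt for d in AVAILABLE_PT) - 1, 0)
--   cmd = PT_TO_CMD[idx]
--   return "" if cmd == "\\normalsize" else cmd
-- ===== Notes on version B (the rewrite author's own statement) =====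
-- stated objective: simpler
-- what changed: A's three-way shape (exact .index lookup / overflow guard / accumulating linear scan with break) is collapsed into one computed bucket index: after the overflow guard, the command is selected directly by counting table entries not exceeding pt, clamped at the first bucket.
import Mathlib
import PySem

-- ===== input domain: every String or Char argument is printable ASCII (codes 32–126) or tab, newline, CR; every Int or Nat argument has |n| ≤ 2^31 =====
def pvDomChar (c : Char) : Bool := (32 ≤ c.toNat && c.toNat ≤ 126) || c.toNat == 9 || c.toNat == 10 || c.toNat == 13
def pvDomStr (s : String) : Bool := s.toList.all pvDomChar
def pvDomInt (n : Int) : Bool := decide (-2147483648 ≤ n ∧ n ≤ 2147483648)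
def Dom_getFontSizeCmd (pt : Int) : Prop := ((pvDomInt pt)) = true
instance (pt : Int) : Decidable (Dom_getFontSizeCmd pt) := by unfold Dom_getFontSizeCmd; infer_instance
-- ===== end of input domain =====

-- B replaces A's three code paths (exact .index lookup / overflow guard / linear scan with
-- break) by one computed bucket index after the overflow guard; objective: simpler.

-- ===== PORT A =====
def pvAVAILABLE_PT : List Int := [6, 8, 9, 10, 11, 12, 15, 16, 21, 25]

def pvPT_TO_CMD : List String :=
  ["\\tiny", "\\scriptsize", "\\footnotesize", "\\small", "\\normalsize",
   "\\large", "\\Large", "\\LARGE", "\\huge", "\\Huge"]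

-- A's else-branch loop: 'for defaultpt in AVAILABLE_PT: if pt >= defaultpt: cmd = PT_TO_CMD[index]; index += 1 else: break'
def pvALoop (pt : Int) : List Int → String → Nat → String
  | [], cmd, _ => cmd
  | d :: rest, cmd, idx =>
      if pt ≥ d then pvALoop pt rest ((PySem.List.pyGet? pvPT_TO_CMD (Int.ofNat idx)).getD "") (idx + 1)
      else cmd

def getFontSizeCmd (pt : Int) : String :=
  if pvAVAILABLE_PT.contains pt then
    -- cmd = PT_TO_CMD[AVAILABLE_PT.index(pt)]  (membership holds, so neither option is none)
    let cmd := ((PySem.List.index? pvAVAILABLE_PT pt).bind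
                  (fun i => PySem.List.pyGet? pvPT_TO_CMD (Int.ofNat i))).getD ""
    if cmd = "\\normalsize" then "" else cmd
  else if pt > (PySem.List.pyGet? pvAVAILABLE_PT (-1)).getD 0 then
    "\\fontsize{" ++ PySem.Int.toStr pt ++ "}{" ++ PySem.Int.toStr pt ++ "}\\selectfont"
  else
    let cmd := pvALoop pt pvAVAILABLE_PT ((PySem.List.pyGet? pvPT_TO_CMD 0).getD "") 0
    if cmd = "\\normalsize" then "" else cmd

-- ===== PORT B =====
def getFontSizeCmd_alt (pt : Int) : String :=
  if pt > (PySem.List.pyGet? pvAVAILABLE_PT (-1)).getD 0 then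
    "\\fontsize{" ++ PySem.Int.toStr pt ++ "}{" ++ PySem.Int.toStr pt ++ "}\\selectfont"
  else
    -- idx = max(sum(d <= pt for d in AVAILABLE_PT) - 1, 0)
    let idx : Int := max ((pvAVAILABLE_PT.countP (fun d => d ≤ pt) : Int) - 1) 0
    let cmd := (PySem.List.pyGet? pvPT_TO_CMD idx).getD ""
    if cmd = "\\normalsize" then "" else cmd

-- ===== PRECONDITION & SPEC =====
def Spec_getFontSizeCmd (pt : Int) (out : String) : Prop := out = getFontSizeCmd_alt pt
instance (pt : Int) (out : String) : Decidable (Spec_getFontSizeCmd pt out) := by unfold Spec_getFontSizeCmd; infer_instance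

-- ===== CLAIM (what is proved, stated in full; the proofs are below) =====
def Claim_equal_getFontSizeCmd : Prop := ∀ (pt : Int), Dom_getFontSizeCmd pt → Spec_getFontSizeCmd pt (getFontSizeCmd pt)

-- ===== LEMMAS AND PROOFS =====

-- below the whole table (pt < 6) both programs give "\tiny"
theorem pv_low (pt : Int) (h : pt < 6) :
    getFontSizeCmd pt = "\\tiny" ∧ getFontSizeCmd_alt pt = "\\tiny" := by
  constructor
  · unfold getFontSizeCmd
    have hc : pvAVAILABLE_PT.contains pt = false := by
      simp [pvAVAILABLE_PT]; omega
    rw [hc]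
    simp only [Bool.false_eq_true, if_false]
    have hgt : ¬ pt > (PySem.List.pyGet? pvAVAILABLE_PT (-1)).getD 0 := by
      simp [pvAVAILABLE_PT, PySem.List.pyGet?, PySem.List.pyIdx?]; omega
    rw [if_neg hgt]
    have hloop : pvALoop pt pvAVAILABLE_PT ((PySem.List.pyGet? pvPT_TO_CMD 0).getD "") 0 = "\\tiny" := by
      unfold pvAVAILABLE_PT pvALoop
      rw [if_neg (by omega)]
      decide
    simp only [hloop]
    decide
  · unfold getFontSizeCmd_alt
    have hgt : ¬ pt > (PySem.List.pyGet? pvAVAILABLE_PT (-1)).getD 0 := by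
      simp [pvAVAILABLE_PT, PySem.List.pyGet?, PySem.List.pyIdx?]; omega
    rw [if_neg hgt]
    have hcnt : pvAVAILABLE_PT.countP (fun d => d ≤ pt) = 0 := by
      rw [List.countP_eq_zero]
      simp [pvAVAILABLE_PT]; omega
    simp only [hcnt]
    decide

-- above the table (pt > 25) both programs give the \fontsize escape
theorem pv_high (pt : Int) (h : pt > 25) : getFontSizeCmd pt = getFontSizeCmd_alt pt := by
  unfold getFontSizeCmd getFontSizeCmd_alt
  have hc : pvAVAILABLE_PT.contains pt = false := by
    simp [pvAVAILABLE_PT]; omega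
  rw [hc]
  have hgt : pt > (PySem.List.pyGet? pvAVAILABLE_PT (-1)).getD 0 := by
    simp [pvAVAILABLE_PT, PySem.List.pyGet?, PySem.List.pyIdx?]; omega
  simp only [Bool.false_eq_true, if_false, if_pos hgt]

-- ===== VERDICT (by name: the statement is the Claim_ definition above) =====
theorem getFontSizeCmd_spec : Claim_equal_getFontSizeCmd := by
  intro pt _
  unfold Spec_getFontSizeCmd
  rcases lt_trichotomy pt 6 with hlt | heq | hgt
  · rw [(pv_low pt hlt).1, (pv_low pt hlt).2]
  · subst heq; decide
  · by_cases h25 : pt > 25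
    · exact pv_high pt h25
    · interval_cases pt <;> decide
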